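-- pv_equiv track=rewrite | github.com/K-Sqr/python-problem-sets | TIPS 103/Unit3_S2.py | build_skyscrapers
-- ===== SOURCE A (Python) =====
-- def build_skyscrapers(floors):
--     stack  = []
--     counter  = 0
--     for floor in floors:
--         # if stack empty, create a new skyscraper(coutner)
--         if not stack:
--             stack.append(floor)
--             counter += 1
--         elif stack[-1] >= floor:
--             stack.append(floor)
--         elif stack[-1] < floor:
--             while stack:
--                 stack.pop()
--             stack.append(floor)
--             counter +=1
--     return counter
-- ===== SOURCE B (Python) =====
-- def build_skyscrapers(floors):
--     count = 0
--     prev = None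
--     for cur in floors:
--         if prev is None or prev < cur:
--             count += 1
--         prev = cur
--     return count
-- ===== Notes on version B (the rewrite author's own statement) =====
-- stated objective: simpler
-- what changed: Replaced A's stack with pop-until-empty bookkeeping by a single pass that keeps only the previous floor and counts a new skyscraper at the start and at each strict increase.
import Mathlib
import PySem

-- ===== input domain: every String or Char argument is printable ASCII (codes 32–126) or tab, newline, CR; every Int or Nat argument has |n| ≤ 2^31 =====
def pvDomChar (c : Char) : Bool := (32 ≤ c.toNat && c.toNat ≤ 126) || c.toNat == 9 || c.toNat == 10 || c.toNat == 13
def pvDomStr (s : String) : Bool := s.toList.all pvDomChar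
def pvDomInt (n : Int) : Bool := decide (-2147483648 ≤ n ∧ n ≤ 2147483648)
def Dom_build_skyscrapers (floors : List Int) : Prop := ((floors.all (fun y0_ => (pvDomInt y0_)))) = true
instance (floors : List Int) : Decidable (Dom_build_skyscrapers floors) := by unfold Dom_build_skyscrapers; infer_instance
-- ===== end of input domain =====

-- B drops A's stack entirely: one pass tracking only the previous floor, counting starts (simpler).

-- ===== PORT A =====
-- 'while stack: stack.pop()' — pops the last element until the stack is empty
def popAll : List Int → List Int
  | [] => []
  | x :: xs => popAll (List.dropLast (x :: xs))
  termination_by l => l.length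
  decreasing_by simp

-- body of A's for-loop; stack[-1] is read only in the branches where stack ≠ []
def buildStep (s : List Int × Int) (floor : Int) : List Int × Int :=
  let stack := s.1
  let counter := s.2
  if stack = [] then (stack ++ [floor], counter + 1)
  else if stack.getLast?.getD 0 ≥ floor then (stack ++ [floor], counter)
  else (popAll stack ++ [floor], counter + 1)

def build_skyscrapers (floors : List Int) : Int :=
  (floors.foldl buildStep ([], 0)).2

-- ===== PORT B =====
-- body of B's for-loop: state = (previous floor if any, count)
def altStep (pc : Option Int × Int) (cur : Int) : Option Int × Int :=
  (some cur,
    match pc.1 with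
    | none => pc.2 + 1
    | some p => if p < cur then pc.2 + 1 else pc.2)

def build_skyscrapers_alt (floors : List Int) : Int :=
  (floors.foldl altStep (none, 0)).2

-- ===== PRECONDITION & SPEC =====
def Spec_build_skyscrapers (floors : List Int) (out : Int) : Prop := out = build_skyscrapers_alt floors
instance (floors : List Int) (out : Int) : Decidable (Spec_build_skyscrapers floors out) := by unfold Spec_build_skyscrapers; infer_instance

-- ===== CLAIM (what is proved, stated in full; the proofs are below) =====
def Claim_equal_build_skyscrapers : Prop := ∀ (floors : List Int), Dom_build_skyscrapers floors → Spec_build_skyscrapers floors (build_skyscrapers floors)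

-- ===== LEMMAS AND PROOFS =====

theorem popAll_eq_nil (l : List Int) : popAll l = [] := by
  fun_induction popAll l with
  | case1 => rfl
  | case2 x xs ih => exact ih

-- loop invariant: once the stack is nonempty, its last element is the previous floor,
-- and the counters of the two loops evolve identically
theorem loop_eq (rest : List Int) : ∀ (stack : List Int) (prev c : Int),
    stack ≠ [] → stack.getLast?.getD 0 = prev →
    (rest.foldl buildStep (stack, c)).2 = (rest.foldl altStep (some prev, c)).2 := by
  induction rest with
  | nil => intro _ _ _ _ _; rfl
  | cons floor rest ih =>
    intro stack prev c hne hlast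
    simp only [List.foldl_cons]
    have hstep : buildStep (stack, c) floor =
        if prev ≥ floor then (stack ++ [floor], c) else (popAll stack ++ [floor], c + 1) := by
      simp [buildStep, hne, hlast]
    by_cases hge : prev ≥ floor
    · rw [hstep, if_pos hge]
      have : (some prev, c).1 = some prev := rfl
      have halt : altStep (some prev, c) floor = (some floor, c) := by
        simp [altStep]; omega
      rw [halt]
      exact ih _ floor c (by simp) (by simp)
    · rw [hstep, if_neg hge]
      have halt : altStep (some prev, c) floor = (some floor, c + 1) := by
        simp [altStep]; omega
      rw [halt, popAll_eq_nil]
      exact ih _ floor (c + 1) (by simp) (by simp)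

-- ===== VERDICT (by name: the statement is the Claim_ definition above) =====
theorem build_skyscrapers_spec : Claim_equal_build_skyscrapers := by
  intro floors _
  unfold Spec_build_skyscrapers build_skyscrapers build_skyscrapers_alt
  cases floors with
  | nil => rfl
  | cons f rest =>
    simp only [List.foldl_cons]
    have hA : buildStep ([], 0) f = ([f], 1) := by simp [buildStep]
    have hB : altStep (none, 0) f = (some f, 1) := by simp [altStep]
    rw [hA, hB]
    exact loop_eq rest [f] f 1 (by simp) (by simp)
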